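-- pv_equiv track=rewrite | github.com/vedang-kamat/line-coding-schemes | Python/nrz_m.py | nrzm_encode
-- ===== SOURCE A (Python) =====
-- def nrzm_encode(bits):
--     """NRZ-M encoding: 1 -> invert level, 0 -> keep previous"""
--     encoded = []
--     current = 1  # starting level (V)
--     for b in bits:
--         if b == 1:
--             current = 0 if current == 1 else 1  # invert
--         encoded.append(current)
--     return encoded
-- ===== SOURCE B (Python) =====
-- def nrzm_encode(bits):
--     """NRZ-M via run-length construction: collect the positions of the 1-bits,
--     then emit alternating constant runs between consecutive toggle positions."""
--     ones = [i for i, b in enumerate(bits) if b == 1]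
--     out = []
--     level, prev = 1, 0
--     for i in ones:
--         out.extend([level] * (i - prev))
--         level, prev = 1 - level, i
--     out.extend([level] * (len(bits) - prev))
--     return out
-- ===== Notes on version B (the rewrite author's own statement) =====
-- stated objective: alternative
-- what changed: B first collects the index list of 1-bits, then builds the output as alternating constant runs between consecutive toggle positions (run-length construction), instead of A's per-bit invert-or-keep state loop.
import Mathlib
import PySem

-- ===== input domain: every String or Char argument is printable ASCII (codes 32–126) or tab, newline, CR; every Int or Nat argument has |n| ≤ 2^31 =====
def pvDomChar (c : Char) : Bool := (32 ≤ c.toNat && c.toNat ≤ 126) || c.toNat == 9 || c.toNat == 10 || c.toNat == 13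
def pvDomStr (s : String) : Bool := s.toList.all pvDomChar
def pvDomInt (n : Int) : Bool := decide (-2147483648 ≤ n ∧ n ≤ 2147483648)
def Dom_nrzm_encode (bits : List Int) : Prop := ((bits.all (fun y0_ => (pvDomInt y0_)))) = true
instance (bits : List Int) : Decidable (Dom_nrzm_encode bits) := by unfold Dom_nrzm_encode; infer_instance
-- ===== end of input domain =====

-- B replaces A's per-bit invert-or-keep state loop by collecting the 1-bit positions and
-- emitting alternating constant runs between them (alternative decomposition, same cost).

-- ===== PORT A =====
-- A's for-loop with state (current, encoded); append = encoded ++ [current]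
def nrzm_encode_loop (bits : List Int) (current : Int) (encoded : List Int) : List Int :=
  match bits with
  | [] => encoded
  | b :: rest =>
    let current' := if b == 1 then (if current == 1 then 0 else 1) else current
    nrzm_encode_loop rest current' (encoded ++ [current'])

def nrzm_encode (bits : List Int) : List Int :=
  nrzm_encode_loop bits 1 []

-- ===== PORT B =====
-- B's comprehension 'ones = [i for i, b in enumerate(bits) if b == 1]', index running from k
def nrzm_onesIdx (k : Int) : List Int → List Int
  | [] => []
  | b :: rest => if b == 1 then k :: nrzm_onesIdx (k + 1) rest else nrzm_onesIdx (k + 1) rest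

-- B's run loop over the toggle positions; the trailing [] case is the final extend after the loop
def nrzm_run_loop (ones : List Int) (level prev : Int) (n : Int) (out : List Int) : List Int :=
  match ones with
  | [] => out ++ List.replicate (n - prev).toNat level
  | i :: rest => nrzm_run_loop rest (1 - level) i n (out ++ List.replicate (i - prev).toNat level)

def nrzm_encode_alt (bits : List Int) : List Int :=
  nrzm_run_loop (nrzm_onesIdx 0 bits) 1 0 (bits.length : Int) []

-- ===== PRECONDITION & SPEC =====
def Spec_nrzm_encode (bits : List Int) (out : List Int) : Prop := out = nrzm_encode_alt bits
instance (bits : List Int) (out : List Int) : Decidable (Spec_nrzm_encode bits out) := by unfold Spec_nrzm_encode; infer_instance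

-- ===== CLAIM (what is proved, stated in full; the proofs are below) =====
def Claim_equal_nrzm_encode : Prop := ∀ (bits : List Int), Dom_nrzm_encode bits → Spec_nrzm_encode bits (nrzm_encode bits)

-- ===== LEMMAS AND PROOFS =====
theorem nrzm_encode_loop_acc (bits : List Int) (c : Int) (enc : List Int) :
    nrzm_encode_loop bits c enc = enc ++ nrzm_encode_loop bits c [] := by
  induction bits generalizing c enc with
  | nil => simp [nrzm_encode_loop]
  | cons b rest ih =>
    simp only [nrzm_encode_loop]
    rw [ih]; conv_rhs => rw [ih]
    simp

theorem nrzm_run_loop_acc (ones : List Int) (level prev n : Int) (out : List Int) :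
    nrzm_run_loop ones level prev n out = out ++ nrzm_run_loop ones level prev n [] := by
  induction ones generalizing level prev out with
  | nil => simp [nrzm_run_loop]
  | cons i rest ih =>
    simp only [nrzm_run_loop]
    rw [ih]; conv_rhs => rw [ih]
    simp

theorem nrzm_onesIdx_cons_one (k : Int) (rest : List Int) :
    nrzm_onesIdx k ((1 : Int) :: rest) = k :: nrzm_onesIdx (k + 1) rest := by
  simp [nrzm_onesIdx]

theorem nrzm_onesIdx_cons_ne (k b : Int) (rest : List Int) (hb : b ≠ 1) :
    nrzm_onesIdx k (b :: rest) = nrzm_onesIdx (k + 1) rest := by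
  simp [nrzm_onesIdx, hb]

theorem nrzm_encode_cons (b : Int) (rest : List Int) (c : Int) :
    nrzm_encode_loop (b :: rest) c []
      = (if b == 1 then (if c == 1 then 0 else 1) else c)
        :: nrzm_encode_loop rest (if b == 1 then (if c == 1 then 0 else 1) else c) [] := by
  simp only [nrzm_encode_loop]
  rw [nrzm_encode_loop_acc]
  simp

theorem nrzm_run_cons (i : Int) (rest : List Int) (level prev n : Int) :
    nrzm_run_loop (i :: rest) level prev n []
      = List.replicate (i - prev).toNat level ++ nrzm_run_loop rest (1 - level) i n [] := by
  simp only [nrzm_run_loop]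
  rw [nrzm_run_loop_acc]
  simp

theorem nrzm_key (bits : List Int) (c k prev : Int) (hc : c = 0 ∨ c = 1) (hprev : prev ≤ k) :
    nrzm_run_loop (nrzm_onesIdx k bits) c prev (k + (bits.length : Int)) []
      = List.replicate (k - prev).toNat c ++ nrzm_encode_loop bits c [] := by
  induction bits generalizing c k prev with
  | nil => simp [nrzm_onesIdx, nrzm_run_loop, nrzm_encode_loop]
  | cons b rest ih =>
    have hn : k + ((b :: rest).length : Int) = (k + 1) + (rest.length : Int) := by
      simp; omega
    by_cases hb : b = 1
    · -- toggle at index k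
      subst hb
      have hcur : (if ((1 : Int) == 1) = true then (if (c == 1) = true then (0 : Int) else 1) else c)
          = 1 - c := by
        rcases hc with h | h <;> subst h <;> simp
      rw [nrzm_onesIdx_cons_one, nrzm_run_cons, nrzm_encode_cons, hcur, hn,
          ih (1 - c) (k + 1) k (by rcases hc with h | h <;> subst h <;> simp) (by omega)]
      have hrep : (k + 1 - k).toNat = 1 := by omega
      rw [hrep]
      simp
    · -- keep level, run grows by one
      have hcur : (if (b == 1) = true then (if (c == 1) = true then (0 : Int) else 1) else c) = c := by
        simp [hb]
      rw [nrzm_onesIdx_cons_ne k b rest hb, nrzm_encode_cons, hcur, hn,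
          ih c (k + 1) prev hc (by omega)]
      have hstep : ((k + 1) - prev).toNat = (k - prev).toNat + 1 := by omega
      rw [hstep, List.replicate_succ']
      simp

-- ===== VERDICT (by name: the statement is the Claim_ definition above) =====
theorem nrzm_encode_spec : Claim_equal_nrzm_encode := by
  intro bits _
  show nrzm_encode bits = nrzm_encode_alt bits
  have h := nrzm_key bits 1 0 0 (Or.inr rfl) (le_refl 0)
  simp only [zero_add] at h
  simp [nrzm_encode, nrzm_encode_alt, h]
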